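-- pv_equiv track=rewrite | github.com/adrianp/Euler | p026.py | cycle_size
-- ===== SOURCE A (Python) =====
-- def cycle_size(n, d):
--     result, seen = "", {}
--     remainder = n % d
--     while remainder != 0 and remainder not in seen:
--         seen[remainder] = len(result)
--         remainder *= 10
--         r, remainder = divmod(remainder, d)
--         result += str(r)
--     if remainder == 0:
--         return 0
--     return len(result[seen[remainder]:])
-- ===== SOURCE B (Python) =====
-- def cycle_size(n, d):
--     r = n % d
--     seen = set()
--     while r != 0 and r not in seen:
--         seen.add(r)
--         r = (r * 10) % d
--     if r == 0:
--         return 0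
--     # r lies on the cycle; measure its length by walking it once
--     k, x = 1, (r * 10) % d
--     while x != r:
--         x = (x * 10) % d
--         k += 1
--     return k
-- ===== Notes on version B (the rewrite author's own statement) =====
-- stated objective: alternative
-- what changed: Replaces the dict-of-positions + growing digit-string bookkeeping by a plain seen-set to reach the cycle, then a second loop that walks the cycle once and counts its length directly.
import Mathlib
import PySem

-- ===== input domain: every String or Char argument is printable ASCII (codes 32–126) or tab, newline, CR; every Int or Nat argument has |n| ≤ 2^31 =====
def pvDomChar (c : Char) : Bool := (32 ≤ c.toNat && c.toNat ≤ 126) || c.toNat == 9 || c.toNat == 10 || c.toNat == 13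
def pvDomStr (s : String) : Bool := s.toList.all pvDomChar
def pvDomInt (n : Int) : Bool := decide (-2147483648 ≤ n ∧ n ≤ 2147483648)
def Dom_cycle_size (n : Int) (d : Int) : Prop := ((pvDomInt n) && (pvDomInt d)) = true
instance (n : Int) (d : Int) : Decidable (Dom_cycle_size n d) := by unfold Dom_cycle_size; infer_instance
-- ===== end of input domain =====

-- B replaces A's dict-of-positions + digit-string bookkeeping by a seen-set walk to the cycle
-- followed by a second loop that walks the cycle once and counts its length (alternative decomposition).

-- ===== PORT A =====
-- the while loop of A; fuel (d.natAbs + 1) only makes the recursion structural — it is proved never to run out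
def pvLoopA (d : Int) : Nat → String → PySem.Dict Int Int → Int → Int
  | 0, _, _, _ => 0
  | fuel+1, result, seen, remainder =>
    if remainder ≠ 0 ∧ seen.contains remainder = false then
      let seen' := seen.insert remainder (PySem.Str.len result)
      let rem10 := remainder * 10
      match PySem.Int.divmod? rem10 d with
      | some qr => pvLoopA d fuel (result ++ PySem.Int.toStr qr.1) seen' qr.2
      | none => 0
    else if remainder = 0 then 0
    else match seen.get? remainder with
      | some p => PySem.Str.len (PySem.Str.slice result (some p) none)
      | none => 0

def cycle_size (n : Int) (d : Int) : Int :=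
  pvLoopA d (d.natAbs + 1) "" PySem.Dict.empty (PySem.Int.mod n d)

-- ===== PORT B =====
-- first loop of B: advance r until it is 0 or already seen (fuel is only for structural recursion)
def pvLoopB1 (d : Int) : Nat → PySem.Set Int → Int → Int
  | 0, _, r => r
  | fuel+1, seen, r =>
    if r ≠ 0 ∧ PySem.Set.contains seen r = false then
      pvLoopB1 d fuel (PySem.Set.add seen r) (PySem.Int.mod (r * 10) d)
    else r

-- second loop of B: walk the cycle once, counting steps until x returns to r
def pvLoopB2 (d : Int) : Nat → Int → Int → Int → Int
  | 0, k, _, _ => k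
  | fuel+1, k, x, r =>
    if x ≠ r then pvLoopB2 d fuel (k + 1) (PySem.Int.mod (x * 10) d) r
    else k

def cycle_size_alt (n : Int) (d : Int) : Int :=
  let r := pvLoopB1 d (d.natAbs + 1) PySem.Set.empty (PySem.Int.mod n d)
  if r = 0 then 0
  else pvLoopB2 d (d.natAbs + 1) 1 (PySem.Int.mod (r * 10) d) r

-- ===== PRECONDITION & SPEC =====
-- Pre_ excludes exactly d = 0, where Python's 'n % d' raises ZeroDivisionError (in A and in B alike).
def Pre_cycle_size (n : Int) (d : Int) : Prop := d ≠ 0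
instance (n : Int) (d : Int) : Decidable (Pre_cycle_size n d) := by unfold Pre_cycle_size; infer_instance
def pvWitness_cycle_size : Int × Int := (7, 12)

def Spec_cycle_size (n : Int) (d : Int) (out : Int) : Prop := out = cycle_size_alt n d
instance (n : Int) (d : Int) (out : Int) : Decidable (Spec_cycle_size n d out) := by unfold Spec_cycle_size; infer_instance

-- ===== CLAIM (what is proved, stated in full; the proofs are below) =====
def Claim_equal_cycle_size : Prop := ∀ (n : Int) (d : Int), Dom_cycle_size n d → Pre_cycle_size n d → Spec_cycle_size n d (cycle_size n d)

-- ===== LEMMAS AND PROOFS =====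

-- the remainder sequence r_0 = n % d, r_{i+1} = (10 * r_i) % d
def pvSeq (n d : Int) : Nat → Int
  | 0 => PySem.Int.mod n d
  | i+1 => PySem.Int.mod (pvSeq n d i * 10) d

-- loop-exit condition at time t: remainder zero or repeated
abbrev pvStop (n d : Int) (t : Nat) : Prop :=
  pvSeq n d t = 0 ∨ ∃ j < t, pvSeq n d j = pvSeq n d t

-- every remainder lies strictly between the divisor and 0 (inclusive on the 0 side)
lemma pvMod_range (a d : Int) :
    (0 < d → 0 ≤ PySem.Int.mod a d ∧ PySem.Int.mod a d < d) ∧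
    (d < 0 → d < PySem.Int.mod a d ∧ PySem.Int.mod a d ≤ 0) := by
  constructor
  · intro h
    exact ⟨PySem.Int.mod_nonneg a h, PySem.Int.mod_lt a h⟩
  · intro h
    exact PySem.Int.mod_neg_bounds a h

lemma pvSeq_range (n d : Int) (hd : d ≠ 0) (i : Nat) :
    (0 < d → 0 ≤ pvSeq n d i ∧ pvSeq n d i < d) ∧ (d < 0 → d < pvSeq n d i ∧ pvSeq n d i ≤ 0) := by
  cases i with
  | zero => exact pvMod_range n d
  | succ i => exact pvMod_range (pvSeq n d i * 10) d

lemma pvStop_exists_le (n d : Int) (hd : d ≠ 0) : ∃ t, t ≤ d.natAbs ∧ pvStop n d t := by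
  by_contra hcon
  push_neg at hcon
  have hinj : ∀ i j : Nat, i < j → j ≤ d.natAbs → pvSeq n d i ≠ pvSeq n d j := by
    intro i j hij hj he
    exact (hcon j hj).2 i hij he
  have hlt : ∀ i : Nat, (if 0 < d then (pvSeq n d i).toNat else (-(pvSeq n d i)).toNat) < d.natAbs := by
    intro i
    have h := pvSeq_range n d hd i
    by_cases hp : 0 < d
    · obtain ⟨h1, h2⟩ := h.1 hp
      simp only [if_pos hp]
      omega
    · have hneg : d < 0 := by omega
      obtain ⟨h1, h2⟩ := h.2 hneg
      simp only [if_neg hp]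
      omega
  have hencinj : ∀ i j : Nat, i ≤ d.natAbs → j ≤ d.natAbs →
      (if 0 < d then (pvSeq n d i).toNat else (-(pvSeq n d i)).toNat)
        = (if 0 < d then (pvSeq n d j).toNat else (-(pvSeq n d j)).toNat) → i = j := by
    intro i j hi hj he
    have hsij : pvSeq n d i = pvSeq n d j := by
      have hri := pvSeq_range n d hd i
      have hrj := pvSeq_range n d hd j
      by_cases hp : 0 < d
      · obtain ⟨h1, _⟩ := hri.1 hp
        obtain ⟨h3, _⟩ := hrj.1 hp
        simp only [if_pos hp] at he
        omega
      · have hneg : d < 0 := by omega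
        obtain ⟨_, h2⟩ := hri.2 hneg
        obtain ⟨_, h4⟩ := hrj.2 hneg
        simp only [if_neg hp] at he
        omega
    rcases lt_trichotomy i j with h | h | h
    · exact absurd hsij (hinj i j h hj)
    · exact h
    · exact absurd hsij.symm (hinj j i h hi)
  have hnodup : ((List.range (d.natAbs + 1)).map
      (fun i => if 0 < d then (pvSeq n d i).toNat else (-(pvSeq n d i)).toNat)).Nodup := by
    refine List.Nodup.map_on ?_ (List.nodup_range)
    intro i hi j hj he
    rw [List.mem_range] at hi hj
    exact hencinj i j (by omega) (by omega) he
  have hsub : ((List.range (d.natAbs + 1)).map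
      (fun i => if 0 < d then (pvSeq n d i).toNat else (-(pvSeq n d i)).toNat)).toFinset
        ⊆ Finset.range d.natAbs := by
    intro x hx
    rw [List.mem_toFinset, List.mem_map] at hx
    obtain ⟨i, _, hix⟩ := hx
    rw [Finset.mem_range]
    rw [← hix]
    exact hlt i
  have hcard := Finset.card_le_card hsub
  rw [List.toFinset_card_of_nodup hnodup] at hcard
  simp only [List.length_map, List.length_range, Finset.card_range] at hcard
  omega

lemma pvStop_exists (n d : Int) (hd : d ≠ 0) : ∃ t, pvStop n d t :=
  (pvStop_exists_le n d hd).imp (fun _ h => h.2)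

-- T = first stopping time
def pvT (n d : Int) (hd : d ≠ 0) : Nat := Nat.find (pvStop_exists n d hd)

lemma pvT_le (n d : Int) (hd : d ≠ 0) : pvT n d hd ≤ d.natAbs := by
  obtain ⟨t, ht, hs⟩ := pvStop_exists_le n d hd
  exact le_trans (Nat.find_min' _ hs) ht

lemma pvT_stop (n d : Int) (hd : d ≠ 0) : pvStop n d (pvT n d hd) := Nat.find_spec _

lemma pvT_min (n d : Int) (hd : d ≠ 0) {i : Nat} (hi : i < pvT n d hd) :
    pvSeq n d i ≠ 0 ∧ ∀ j < i, pvSeq n d j ≠ pvSeq n d i := by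
  have h := Nat.find_min (pvStop_exists n d hd) hi
  unfold pvStop at h
  push_neg at h
  exact h

-- mu = first index whose remainder equals r_T
lemma pvMuP_exists (n d : Int) (hd : d ≠ 0) : ∃ j, pvSeq n d j = pvSeq n d (pvT n d hd) :=
  ⟨pvT n d hd, rfl⟩

def pvMu (n d : Int) (hd : d ≠ 0) : Nat := Nat.find (pvMuP_exists n d hd)

lemma pvMu_eq (n d : Int) (hd : d ≠ 0) : pvSeq n d (pvMu n d hd) = pvSeq n d (pvT n d hd) :=
  Nat.find_spec (pvMuP_exists n d hd)

lemma pvMu_lt (n d : Int) (hd : d ≠ 0) (h0 : pvSeq n d (pvT n d hd) ≠ 0) :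
    pvMu n d hd < pvT n d hd := by
  rcases pvT_stop n d hd with h | ⟨j, hj, hje⟩
  · exact absurd h h0
  · exact lt_of_le_of_lt (Nat.find_min' _ hje) hj

-- B's first loop reaches r_T
lemma pvLoopB1_spec (n d : Int) (hd : d ≠ 0) :
    ∀ (F i : Nat), i ≤ pvT n d hd → pvT n d hd - i < F →
      pvLoopB1 d F ((List.range i).map (pvSeq n d)) (pvSeq n d i) = pvSeq n d (pvT n d hd) := by
  intro F
  induction F with
  | zero => intro i hi hF; omega
  | succ F ih =>
    intro i hi hF
    rcases eq_or_lt_of_le hi with heq | hlt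
    · rw [pvLoopB1, if_neg, heq]
      intro ⟨h0, hc⟩
      rcases heq ▸ pvT_stop n d hd with hz | ⟨j, hj, hje⟩
      · exact h0 hz
      · have : PySem.Set.contains ((List.range i).map (pvSeq n d)) (pvSeq n d i) = true := by
          rw [PySem.Set.contains_iff]
          exact List.mem_map.mpr ⟨j, List.mem_range.mpr hj, hje⟩
        rw [this] at hc
        simp at hc
    · have h2 := pvT_min n d hd hlt
      have hc : PySem.Set.contains ((List.range i).map (pvSeq n d)) (pvSeq n d i) = false := by
        rw [Bool.eq_false_iff]
        intro hc
        rw [PySem.Set.contains_iff, List.mem_map] at hc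
        obtain ⟨j, hj, hje⟩ := hc
        exact h2.2 j (List.mem_range.mp hj) hje
      rw [pvLoopB1, if_pos ⟨h2.1, hc⟩]
      have hadd : PySem.Set.add ((List.range i).map (pvSeq n d)) (pvSeq n d i)
          = (List.range (i + 1)).map (pvSeq n d) := by
        rw [PySem.Set.add, hc]
        simp [List.range_succ]
      rw [hadd]
      exact ih (i + 1) hlt (by omega)

-- B's second loop counts the cycle length T - mu
lemma pvLoopB2_spec (n d : Int) (hd : d ≠ 0) (h0 : pvSeq n d (pvT n d hd) ≠ 0) :
    ∀ (F k : Nat), 1 ≤ k → k ≤ pvT n d hd - pvMu n d hd → pvT n d hd - pvMu n d hd - k < F →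
      pvLoopB2 d F (k : Int) (pvSeq n d (pvMu n d hd + k)) (pvSeq n d (pvT n d hd))
        = ((pvT n d hd : Int) - (pvMu n d hd : Int)) := by
  have hμT := pvMu_lt n d hd h0
  intro F
  induction F with
  | zero => intro k h1 h2 h3; omega
  | succ F ih =>
    intro k h1 h2 h3
    rcases eq_or_lt_of_le h2 with heq | hlt
    · have hMT : pvMu n d hd + k = pvT n d hd := by omega
      rw [pvLoopB2, hMT, if_neg (by simp)]
      omega
    · have hik : pvMu n d hd + k < pvT n d hd := by omega
      have h2' := pvT_min n d hd hik
      have hne : pvSeq n d (pvMu n d hd + k) ≠ pvSeq n d (pvT n d hd) := by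
        rw [← pvMu_eq n d hd]
        intro he
        exact h2'.2 (pvMu n d hd) (by omega) he.symm
      rw [pvLoopB2, if_pos hne]
      have hx : PySem.Int.mod (pvSeq n d (pvMu n d hd + k) * 10) d
          = pvSeq n d (pvMu n d hd + (k + 1)) := rfl
      have hk : (k : Int) + 1 = ((k + 1 : Nat) : Int) := by push_cast; ring
      rw [hx, hk]
      exact ih (k + 1) (by omega) (by omega) (by omega)

-- each digit A appends is a single character: the quotient lies in [0, 9]
lemma pvDigit_bounds (d r : Int) (hd : d ≠ 0)
    (hr : (0 < d → 0 ≤ r ∧ r < d) ∧ (d < 0 → d < r ∧ r ≤ 0)) :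
    0 ≤ PySem.Int.floordiv (r * 10) d ∧ PySem.Int.floordiv (r * 10) d < 10 := by
  have hdm := PySem.Int.floordiv_mul_add_mod (r * 10) d
  by_cases hp : 0 < d
  · obtain ⟨h1, h2⟩ := hr.1 hp
    have hm := (pvMod_range (r * 10) d).1 hp
    constructor
    · by_contra hq
      push_neg at hq
      have h5 : PySem.Int.floordiv (r * 10) d * d ≤ -1 * d :=
        mul_le_mul_of_nonneg_right (by omega) (by omega)
      omega
    · by_contra hq
      push_neg at hq
      have h5 : 10 * d ≤ PySem.Int.floordiv (r * 10) d * d :=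
        mul_le_mul_of_nonneg_right hq (by omega)
      omega
  · have hneg : d < 0 := by omega
    obtain ⟨h1, h2⟩ := hr.2 hneg
    have hm := (pvMod_range (r * 10) d).2 hneg
    constructor
    · by_contra hq
      push_neg at hq
      have h5 : -1 * d ≤ PySem.Int.floordiv (r * 10) d * d :=
        mul_le_mul_of_nonpos_right (by omega) (by omega)
      omega
    · by_contra hq
      push_neg at hq
      have h5 : PySem.Int.floordiv (r * 10) d * d ≤ 10 * d :=
        mul_le_mul_of_nonpos_right hq (by omega)
      omega

lemma pvDigit_len (q : Int) (h0 : 0 ≤ q) (h9 : q < 10) :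
    PySem.Str.len (PySem.Int.toStr q) = 1 := by
  interval_cases q <;> decide

-- A's loop returns 0 or T - mu
lemma pvLoopA_spec (n d : Int) (hd : d ≠ 0) :
    ∀ (F i : Nat) (result : String) (seen : PySem.Dict Int Int),
      i ≤ pvT n d hd → pvT n d hd - i < F →
      PySem.Str.len result = (i : Int) →
      (∀ v : Int, seen.contains v = true ↔ ∃ j < i, pvSeq n d j = v) →
      (∀ j : Nat, j < i → seen.get? (pvSeq n d j) = some (j : Int)) →
      pvLoopA d F result seen (pvSeq n d i)
        = (if pvSeq n d (pvT n d hd) = 0 then 0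
           else ((pvT n d hd : Int) - (pvMu n d hd : Int))) := by
  intro F
  induction F with
  | zero => intro i result seen hi hF hlen hcont hget; omega
  | succ F ih =>
    intro i result seen hi hF hlen hcont hget
    rcases eq_or_lt_of_le hi with heq | hlt
    · -- i = T : the loop exits
      rw [pvLoopA, if_neg]
      · by_cases h0 : pvSeq n d i = 0
        · rw [if_pos h0, if_pos (heq ▸ h0)]
        · have h0' : pvSeq n d (pvT n d hd) ≠ 0 := heq ▸ h0
          have hμ := pvMu_lt n d hd h0'
          rw [if_neg h0, if_neg h0']
          have hgetμ : seen.get? (pvSeq n d i) = some ((pvMu n d hd : Nat) : Int) := by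
            have : pvSeq n d i = pvSeq n d (pvMu n d hd) := by
              rw [heq, ← pvMu_eq n d hd]
            rw [this]
            exact hget (pvMu n d hd) (by omega)
          rw [hgetμ]
          show PySem.Str.len (PySem.Str.slice result (some ((pvMu n d hd : Nat) : Int)) none)
              = ((pvT n d hd : Int) - (pvMu n d hd : Int))
          have hlist : (PySem.Str.slice result (some ((pvMu n d hd : Nat) : Int)) none).toList
              = result.toList.drop (pvMu n d hd) := by
            rw [PySem.Str.toList_slice, PySem.Chars.slice_eq_listSlice,
              PySem.List.slice_from_natCast]
          have hlen' : result.toList.length = i := by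
            have := PySem.Str.len_eq result
            omega
          rw [PySem.Str.len_eq, hlist, List.length_drop, hlen', heq]
          omega
      · intro ⟨h0, hc⟩
        rcases heq ▸ pvT_stop n d hd with hz | ⟨j, hj, hje⟩
        · exact h0 hz
        · have : seen.contains (pvSeq n d i) = true :=
            (hcont (pvSeq n d i)).mpr ⟨j, heq ▸ hj, hje⟩
          rw [this] at hc
          simp at hc
    · -- i < T : one more iteration
      have h2 := pvT_min n d hd hlt
      have hc : seen.contains (pvSeq n d i) = false := by
        rw [Bool.eq_false_iff]
        intro hcc
        obtain ⟨j, hj, hje⟩ := (hcont (pvSeq n d i)).mp hcc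
        exact h2.2 j hj hje
      rw [pvLoopA, if_pos ⟨h2.1, hc⟩]
      have hdm : PySem.Int.divmod? (pvSeq n d i * 10) d
          = some (PySem.Int.floordiv (pvSeq n d i * 10) d, PySem.Int.mod (pvSeq n d i * 10) d) := by
        simp [PySem.Int.divmod?, hd, PySem.Int.floordiv, PySem.Int.mod]
      show (match PySem.Int.divmod? (pvSeq n d i * 10) d with
        | some qr => pvLoopA d F (result ++ PySem.Int.toStr qr.1)
            (seen.insert (pvSeq n d i) (PySem.Str.len result)) qr.2
        | none => 0) = _
      rw [hdm, hlen]
      have hq := pvDigit_bounds d (pvSeq n d i) hd (pvSeq_range n d hd i)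
      have hx : PySem.Int.mod (pvSeq n d i * 10) d = pvSeq n d (i + 1) := rfl
      rw [hx]
      apply ih (i + 1) _ _ hlt (by omega)
      · rw [PySem.Str.len_append, pvDigit_len _ hq.1 hq.2, hlen]
        push_cast
        ring
      · intro v
        rw [PySem.Dict.contains_insert]
        constructor
        · intro hv
          rcases Bool.or_eq_true_iff.mp hv with hv | hv
          · have hvv : v = pvSeq n d i := by simpa using hv
            exact ⟨i, by omega, hvv.symm⟩
          · obtain ⟨j, hj, hje⟩ := (hcont v).mp hv
            exact ⟨j, by omega, hje⟩
        · intro ⟨j, hj, hje⟩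
          rcases Nat.lt_succ_iff_lt_or_eq.mp hj with hj | hj
          · exact Bool.or_eq_true_iff.mpr (Or.inr ((hcont v).mpr ⟨j, hj, hje⟩))
          · exact Bool.or_eq_true_iff.mpr (Or.inl (by simp [← hje, hj]))
      · intro j hj
        rcases Nat.lt_succ_iff_lt_or_eq.mp hj with hj | hj
        · rw [PySem.Dict.get?_insert_of_ne _ _ (h2.2 j hj)]
          exact hget j hj
        · rw [hj, PySem.Dict.get?_insert_self]

-- ===== VERDICT (by name: the statement is the Claim_ definition above) =====
theorem cycle_size_spec : Claim_equal_cycle_size := by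
  intro n d _ hd
  show cycle_size n d = cycle_size_alt n d
  unfold cycle_size cycle_size_alt
  have hT := pvT_le n d hd
  have hseq0 : PySem.Int.mod n d = pvSeq n d 0 := rfl
  have hA : pvLoopA d (d.natAbs + 1) "" PySem.Dict.empty (pvSeq n d 0)
      = (if pvSeq n d (pvT n d hd) = 0 then 0
         else ((pvT n d hd : Int) - (pvMu n d hd : Int))) := by
    apply pvLoopA_spec n d hd (d.natAbs + 1) 0 "" PySem.Dict.empty (by omega) (by omega)
    · decide
    · intro v
      simp [PySem.Dict.contains_empty]
    · intro j hj
      omega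
  have hB1 : pvLoopB1 d (d.natAbs + 1) PySem.Set.empty (pvSeq n d 0) = pvSeq n d (pvT n d hd) := by
    have := pvLoopB1_spec n d hd (d.natAbs + 1) 0 (by omega) (by omega)
    simpa using this
  rw [hseq0, hA, hB1]
  by_cases h0 : pvSeq n d (pvT n d hd) = 0
  · rw [if_pos h0, if_pos h0]
  · rw [if_neg h0, if_neg h0]
    have hμ := pvMu_lt n d hd h0
    have hx : PySem.Int.mod (pvSeq n d (pvT n d hd) * 10) d = pvSeq n d (pvMu n d hd + 1) := by
      rw [← pvMu_eq n d hd]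
      rfl
    rw [hx]
    have h1 : (1 : Int) = ((1 : Nat) : Int) := by norm_num
    rw [h1]
    exact (pvLoopB2_spec n d hd h0 (d.natAbs + 1) 1 (by omega) (by omega) (by omega)).symm
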